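-- pv_equiv track=rewrite | github.com/reshinto/algo_flow | src/algorithms/strings/trie-operations/auto-complete-trie/sources/auto-complete-trie.py | auto_complete_trie
-- ===== SOURCE A (Python) =====
-- class TrieNode:
--     def __init__(self) -> None:  # @step:initialize
--         self.children: dict[str, "TrieNode"] = {}  # @step:initialize
--         self.is_end: bool = False  # @step:initialize
--
-- def _collect_words(
--     node: TrieNode,
--     current_prefix: str,
--     results: list[str],
-- ) -> None:
--     if node.is_end:  # @step:add-to-result
--         results.append(current_prefix)  # @step:add-to-result
--     for char, child in node.children.items():  # @step:traverse-trie
--         _collect_words(child, current_prefix + char, results)  # @step:traverse-trie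
--
-- def auto_complete_trie(words: list[str], prefix: str) -> list[str]:
--     root = TrieNode()  # @step:initialize
--
--     for word in words:  # @step:visit
--         current = root  # @step:visit
--         for char in word:  # @step:insert-trie
--             if char not in current.children:  # @step:insert-trie
--                 current.children[char] = TrieNode()  # @step:insert-trie
--             current = current.children[char]  # @step:traverse-trie
--         current.is_end = True  # @step:mark-end-word
--
--     prefix_node = root  # @step:visit
--     for char in prefix:  # @step:traverse-trie
--         if char not in prefix_node.children:  # @step:traverse-trie
--             return []  # @step:traverse-trie
--         prefix_node = prefix_node.children[char]  # @step:traverse-trie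
--
--     results: list[str] = []
--     _collect_words(prefix_node, prefix, results)  # @step:add-to-result
--     return results  # @step:complete
-- ===== SOURCE B (Python) =====
-- def auto_complete_trie(words: list[str], prefix: str) -> list[str]:
--     group = [w[len(prefix):] for w in words if w.startswith(prefix)]
--
--     def go(pref: str, group: list[str]) -> list[str]:
--         out = []
--         if "" in group:
--             out.append(pref)
--         seen = []
--         for s in group:
--             if s and s[0] not in seen:
--                 seen.append(s[0])
--         for c in seen:
--             out += go(pref + c, [s[1:] for s in group if s and s[0] == c])
--         return out
--
--     return go(prefix, group)
-- ===== Notes on version B (the rewrite author's own statement) =====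
-- stated objective: simpler
-- what changed: Replaces the TrieNode class, pointer-walking insertion and node DFS by a direct recursive group-by-first-character over the candidate suffixes (filter words by prefix once, then recurse on buckets in first-appearance order), with no trie data structure at all.
import Mathlib
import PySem

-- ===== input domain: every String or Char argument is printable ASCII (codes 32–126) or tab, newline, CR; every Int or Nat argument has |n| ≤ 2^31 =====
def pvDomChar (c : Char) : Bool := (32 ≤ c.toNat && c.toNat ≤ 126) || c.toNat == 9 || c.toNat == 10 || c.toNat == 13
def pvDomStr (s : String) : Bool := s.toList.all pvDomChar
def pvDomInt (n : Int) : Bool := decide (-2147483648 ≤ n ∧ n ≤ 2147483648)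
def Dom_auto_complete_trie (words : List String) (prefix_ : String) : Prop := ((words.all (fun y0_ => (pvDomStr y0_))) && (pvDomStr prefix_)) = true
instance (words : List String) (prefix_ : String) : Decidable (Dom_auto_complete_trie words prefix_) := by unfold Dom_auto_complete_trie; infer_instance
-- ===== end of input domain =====

-- B drops the trie data structure for a recursive group-by-first-character over candidate
-- suffixes (simpler; same return value, no side effects in either version).

-- ===== PORT A =====
-- TrieNode: is_end plus children as an insertion-ordered assoc list (a mutual pair,
-- since a nested 'List (Char × Trie)' inductive is not allowed).
mutual
inductive PTrie : Type where
  | mk (isEnd : Bool) (children : PChildren)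
  deriving Repr
inductive PChildren : Type where
  | nil
  | cons (c : Char) (t : PTrie) (rest : PChildren)
  deriving Repr
end

-- A's insertion loop: walk/extend the children dict char by char, set is_end at the end.
-- insertC is 'children[char] = TrieNode() if absent; descend' (dict = assoc list,
-- overwrite in place, append new key at the end — Python dict insertion order).
mutual
def insertT : PTrie → List Char → PTrie
  | .mk _ ch, [] => .mk true ch
  | .mk e ch, c :: r => .mk e (insertC ch c r)
termination_by t l => (l.length, 0, 0)
def insertC : PChildren → Char → List Char → PChildren
  | .nil, c, r => .cons c (insertT (.mk false .nil) r) .nil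
  | .cons c' t rest, c, r =>
      if c' = c then .cons c' (insertT t r) rest else .cons c' t (insertC rest c r)
termination_by ch _ l => (l.length, 1, sizeOf ch)
end

-- A's _collect_words: results returned instead of mutated in place (pre-order: the
-- node's word first, then the children in insertion order).
mutual
def collectT : PTrie → List Char → List (List Char)
  | .mk e ch, pref => (if e then [pref] else []) ++ collectC ch pref
def collectC : PChildren → List Char → List (List Char)
  | .nil, _ => []
  | .cons c t rest, pref => collectT t (pref ++ [c]) ++ collectC rest pref
end

-- 'char in children' / 'children[char]' of A's prefix-descent loop
def childFind : PChildren → Char → Option PTrie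
  | .nil, _ => none
  | .cons c' t rest, c => if c' = c then some t else childFind rest c

-- A's 'for char in prefix: if absent return []' loop
def descendT : PTrie → List Char → Option PTrie
  | t, [] => some t
  | .mk _ ch, c :: r =>
      match childFind ch c with
      | none => none
      | some t => descendT t r

def auto_complete_trie (words : List String) (prefix_ : String) : List String :=
  let root := words.foldl (fun t w => insertT t w.toList) (.mk false .nil)
  match descendT root prefix_.toList with
  | none => []
  | some n => (collectT n prefix_.toList).map (fun l => String.mk l)

-- ===== PORT B =====
-- first characters of the group's nonempty members, in first-appearance order
def seenB (group : List (List Char)) : List Char :=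
  group.foldl (fun seen s =>
    match s with
    | [] => seen
    | c :: _ => if c ∈ seen then seen else seen ++ [c]) []

-- '[s[1:] for s in group if s and s[0] == c]'
def tailsc (c : Char) (group : List (List Char)) : List (List Char) :=
  group.filterMap (fun s =>
    match s with
    | [] => none
    | c' :: r => if c' = c then some r else none)

def mGrp (group : List (List Char)) : Nat := (group.map (fun s => s.length + 1)).sum

-- termination helpers for goB (cited by name in decreasing_by)
theorem mGrp_tailsc_le (c : Char) (g : List (List Char)) : mGrp (tailsc c g) ≤ mGrp g := by
  induction g with
  | nil => simp [mGrp, tailsc]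
  | cons s g ih =>
    cases s with
    | nil =>
      have h1 : tailsc c ([] :: g) = tailsc c g := by simp [tailsc]
      rw [h1]; simp only [mGrp, List.map_cons, List.sum_cons] at ih ⊢; omega
    | cons c' r =>
      by_cases h : c' = c
      · have h1 : tailsc c ((c' :: r) :: g) = r :: tailsc c g := by simp [tailsc, h]
        rw [h1]; simp only [mGrp, List.map_cons, List.sum_cons, List.length_cons] at ih ⊢; omega
      · have h1 : tailsc c ((c' :: r) :: g) = tailsc c g := by simp [tailsc, h]
        rw [h1]; simp only [mGrp, List.map_cons, List.sum_cons] at ih ⊢; omega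

theorem mGrp_tailsc_lt (c : Char) (r : List Char) (g : List (List Char))
    (h : (c :: r) ∈ g) : mGrp (tailsc c g) < mGrp g := by
  induction g with
  | nil => simp at h
  | cons s g ih =>
    rcases List.mem_cons.mp h with h1 | h2
    · subst h1
      have hle := mGrp_tailsc_le c g
      have h1 : tailsc c ((c :: r) :: g) = r :: tailsc c g := by simp [tailsc]
      rw [h1]
      simp only [mGrp, List.map_cons, List.sum_cons, List.length_cons] at hle ⊢; omega
    · have hlt := ih h2
      cases s with
      | nil =>
        have h1 : tailsc c ([] :: g) = tailsc c g := by simp [tailsc]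
        rw [h1]; simp only [mGrp, List.map_cons, List.sum_cons] at hlt ⊢; omega
      | cons c' r' =>
        by_cases hc : c' = c
        · have h1 : tailsc c ((c' :: r') :: g) = r' :: tailsc c g := by simp [tailsc, hc]
          rw [h1]
          simp only [mGrp, List.map_cons, List.sum_cons, List.length_cons] at hlt ⊢; omega
        · have h1 : tailsc c ((c' :: r') :: g) = tailsc c g := by simp [tailsc, hc]
          rw [h1]; simp only [mGrp, List.map_cons, List.sum_cons] at hlt ⊢; omega

theorem seenB_sound_aux (g : List (List Char)) :
    ∀ acc c, c ∈ g.foldl (fun seen s =>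
        match s with
        | [] => seen
        | c :: _ => if c ∈ seen then seen else seen ++ [c]) acc →
      c ∈ acc ∨ ∃ r, (c :: r) ∈ g := by
  induction g with
  | nil => intro acc c h; exact Or.inl (by simpa using h)
  | cons s g ih =>
    intro acc c h
    simp only [List.foldl_cons] at h
    cases s with
    | nil =>
      rcases ih _ c h with h1 | ⟨r, hr⟩
      · exact Or.inl h1
      · exact Or.inr ⟨r, List.mem_cons_of_mem _ hr⟩
    | cons c0 r0 =>
      rcases ih _ c h with h1 | ⟨r, hr⟩
      · by_cases hm : c0 ∈ acc
        · simp [hm] at h1; exact Or.inl h1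
        · simp [hm, List.mem_append] at h1
          rcases h1 with h1 | h1
          · exact Or.inl h1
          · exact Or.inr ⟨r0, by simp [h1]⟩
      · exact Or.inr ⟨r, List.mem_cons_of_mem _ hr⟩

theorem seenB_sound {c : Char} {g : List (List Char)} (h : c ∈ seenB g) :
    ∃ r, (c :: r) ∈ g := by
  rcases seenB_sound_aux g [] c h with h1 | h2
  · simp at h1
  · exact h2

-- B's recursion: emit the finished word of the group (if any), then recurse into the
-- buckets keyed by next character in first-appearance order.  '.attach' only carries
-- the membership fact needed for termination.
def goB (pref : List Char) (group : List (List Char)) : List (List Char) :=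
  (if [] ∈ group then [pref] else []) ++
    (seenB group).attach.flatMap (fun cp => goB (pref ++ [cp.1]) (tailsc cp.1 group))
termination_by mGrp group
decreasing_by
  obtain ⟨r, hr⟩ := seenB_sound cp.2
  exact mGrp_tailsc_lt _ r _ hr

-- '[w[len(prefix):] for w in words if w.startswith(prefix)]' (startswith = char-list
-- prefix test, slice from a nonnegative index = drop; exact), then the recursion.
def auto_complete_trie_alt (words : List String) (prefix_ : String) : List String :=
  let p := prefix_.toList
  let group := words.filterMap (fun w =>
    if p.isPrefixOf w.toList then some (w.toList.drop p.length) else none)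
  (goB p group).map (fun l => String.mk l)

-- ===== PRECONDITION & SPEC =====
def Spec_auto_complete_trie (words : List String) (prefix_ : String) (out : List String) : Prop := out = auto_complete_trie_alt words prefix_
instance (words : List String) (prefix_ : String) (out : List String) : Decidable (Spec_auto_complete_trie words prefix_ out) := by unfold Spec_auto_complete_trie; infer_instance

-- ===== CLAIM (what is proved, stated in full; the proofs are below) =====
def Claim_equal_auto_complete_trie : Prop := ∀ (words : List String) (prefix_ : String), Dom_auto_complete_trie words prefix_ → Spec_auto_complete_trie words prefix_ (auto_complete_trie words prefix_)

-- ===== LEMMAS AND PROOFS =====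

-- the trie A builds from a list of (remaining) character lists
def buildFrom (ss : List (List Char)) : PTrie := ss.foldl insertT (.mk false .nil)

-- the children list the canonical-form lemma predicts: one entry per key of cs,
-- holding the trie built from the tails of the members starting with that key
def chList (cs : List Char) (ss : List (List Char)) : PChildren :=
  match cs with
  | [] => .nil
  | c :: cs' => .cons c (buildFrom (tailsc c ss)) (chList cs' ss)

def candTails (p : List Char) (ss : List (List Char)) : List (List Char) :=
  ss.filterMap (fun s => if p.isPrefixOf s then some (s.drop p.length) else none)

theorem seenB_foldl_mono (g : List (List Char)) :
    ∀ acc c, c ∈ acc → c ∈ g.foldl (fun seen s =>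
        match s with
        | [] => seen
        | c :: _ => if c ∈ seen then seen else seen ++ [c]) acc := by
  induction g with
  | nil => intro acc c h; simpa using h
  | cons s g ih =>
    intro acc c h
    simp only [List.foldl_cons]
    cases s with
    | nil => exact ih _ _ h
    | cons c0 _ =>
      by_cases hm : c0 ∈ acc
      · simpa [hm] using ih _ _ h
      · exact ih _ _ (by simp [hm, h])

theorem seenB_complete_aux (g : List (List Char)) :
    ∀ (acc : List Char) (c : Char) (r : List Char), (c :: r) ∈ g →
      c ∈ g.foldl (fun seen s =>
        match s with
        | [] => seen
        | c :: _ => if c ∈ seen then seen else seen ++ [c]) acc := by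
  induction g with
  | nil => intro acc c r h; simp at h
  | cons s g ih =>
    intro acc c r h
    simp only [List.foldl_cons]
    rcases List.mem_cons.mp h with h1 | h2
    · subst h1
      by_cases hm : c ∈ acc
      · exact seenB_foldl_mono g _ c (by simp [hm])
      · exact seenB_foldl_mono g _ c (by simp [hm])
    · cases s with
      | nil => exact ih _ c r h2
      | cons c0 _ => exact ih _ c r h2

theorem seenB_complete {c : Char} {r : List Char} {g : List (List Char)}
    (h : (c :: r) ∈ g) : c ∈ seenB g :=
  seenB_complete_aux g [] c r h

theorem tailsc_nil_of_not_seen {c : Char} {g : List (List Char)}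
    (h : c ∉ seenB g) : tailsc c g = [] := by
  unfold tailsc
  rw [List.filterMap_eq_nil_iff]
  intro s hs
  cases s with
  | nil => rfl
  | cons c' r =>
    by_cases hc : c' = c
    · exact absurd (seenB_complete (hc ▸ hs)) h
    · simp [hc]

theorem seenB_nodup_aux (g : List (List Char)) :
    ∀ acc : List Char, acc.Nodup →
      (g.foldl (fun seen s =>
          match s with
          | [] => seen
          | c :: _ => if c ∈ seen then seen else seen ++ [c]) acc).Nodup := by
  induction g with
  | nil => intro acc h; simpa using h
  | cons s g ih =>
    intro acc h
    simp only [List.foldl_cons]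
    cases s with
    | nil => exact ih _ h
    | cons c0 _ =>
      by_cases hm : c0 ∈ acc
      · simpa [hm] using ih _ h
      · refine ih _ ?_
        show (if c0 ∈ acc then acc else acc ++ [c0]).Nodup
        rw [if_neg hm]
        refine List.nodup_append.mpr ⟨h, List.nodup_singleton _, ?_⟩
        intro a ha b hb
        rw [List.mem_singleton] at hb
        subst hb
        exact fun he => hm (he ▸ ha)

theorem seenB_nodup (g : List (List Char)) : (seenB g).Nodup :=
  seenB_nodup_aux g [] List.nodup_nil

theorem buildFrom_snoc (ss : List (List Char)) (s : List Char) :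
    buildFrom (ss ++ [s]) = insertT (buildFrom ss) s := by
  simp [buildFrom]

theorem tailsc_snoc (c : Char) (ss : List (List Char)) (s : List Char) :
    tailsc c (ss ++ [s]) =
      tailsc c ss ++ (match s with
        | [] => []
        | c' :: r => if c' = c then [r] else []) := by
  cases s with
  | nil => simp [tailsc, List.filterMap_append]
  | cons c' r =>
    by_cases h : c' = c <;> simp [tailsc, List.filterMap_append, h]

theorem seenB_snoc (ss : List (List Char)) (s : List Char) :
    seenB (ss ++ [s]) =
      match s with
      | [] => seenB ss
      | c :: _ => if c ∈ seenB ss then seenB ss else seenB ss ++ [c] := by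
  cases s <;> simp [seenB, List.foldl_append]

theorem chList_congr (cs : List Char) (ss ss' : List (List Char))
    (h : ∀ c ∈ cs, tailsc c ss' = tailsc c ss) : chList cs ss' = chList cs ss := by
  induction cs with
  | nil => rfl
  | cons c cs ih =>
    simp only [chList]
    rw [h c (by simp), ih (fun c' hc' => h c' (by simp [hc']))]

theorem insertC_chList (cs : List Char) (ss ss' : List (List Char)) (c0 : Char) (r : List Char)
    (h1 : ∀ c ∈ cs, c ≠ c0 → tailsc c ss' = tailsc c ss)
    (h2 : tailsc c0 ss' = tailsc c0 ss ++ [r])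
    (h3 : c0 ∉ cs → tailsc c0 ss = [])
    (hnd : cs.Nodup) :
    insertC (chList cs ss) c0 r = chList (if c0 ∈ cs then cs else cs ++ [c0]) ss' := by
  induction cs with
  | nil =>
    have hr : tailsc c0 ss' = [r] := by rw [h2, h3 (by simp)]; simp
    have hb : buildFrom [r] = insertT (.mk false .nil) r := rfl
    simp [chList, insertC, hr, hb]
  | cons c cs ih =>
    by_cases hc : c = c0
    · subst hc
      have hmem : c ∈ c :: cs := by simp
      simp only [chList, insertC, if_pos rfl, if_pos hmem]
      have hrest : chList cs ss' = chList cs ss := by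
        apply chList_congr
        intro c' hc'
        have hne : c' ≠ c := fun he => (List.nodup_cons.mp hnd).1 (he ▸ hc')
        exact h1 c' (by simp [hc']) hne
      rw [hrest, ← buildFrom_snoc, ← h2]
      rfl
    · simp only [chList, insertC, if_neg hc]
      have hih := ih (fun c' hc' hne => h1 c' (by simp [hc']) hne)
        (fun hn => h3 (by simp [hn, Ne.symm hc]))
        (List.nodup_cons.mp hnd).2
      have hmem : (c0 ∈ c :: cs) = (c0 ∈ cs) := by simp [Ne.symm hc]
      rw [hih]
      have hcss : tailsc c ss' = tailsc c ss := h1 c (by simp) hc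
      by_cases hm : c0 ∈ cs <;>
        simp [chList, hcss, List.mem_cons, Ne.symm hc, hm]

theorem buildFrom_canon (ss : List (List Char)) :
    buildFrom ss = .mk (decide ([] ∈ ss)) (chList (seenB ss) ss) := by
  induction ss using List.reverseRecOn with
  | nil => simp [buildFrom, seenB, chList, List.foldl_nil]
  | append_singleton ss s ih =>
    rw [buildFrom_snoc, ih]
    cases s with
    | nil =>
      simp only [insertT, seenB_snoc]
      have : chList (seenB ss) (ss ++ [[]]) = chList (seenB ss) ss := by
        apply chList_congr
        intro c _
        simp [tailsc_snoc]
      rw [← this]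
      simp
    | cons c0 r =>
      simp only [insertT, seenB_snoc]
      have hins := insertC_chList (seenB ss) ss (ss ++ [c0 :: r]) c0 r
        (fun c _ hne => by rw [tailsc_snoc]; simp [Ne.symm hne])
        (by rw [tailsc_snoc]; simp)
        (fun hn => tailsc_nil_of_not_seen hn)
        (seenB_nodup ss)
      rw [hins]
      congr 1
      simp

theorem collectC_chList (cs : List Char) (ss : List (List Char)) (pref : List Char) :
    collectC (chList cs ss) pref =
      cs.flatMap (fun c => collectT (buildFrom (tailsc c ss)) (pref ++ [c])) := by
  induction cs with
  | nil => simp [chList, collectC]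
  | cons c cs ih => simp [chList, collectC, ih]

theorem flatMap_attach_val {α β : Type} (l : List α) (f : α → List β) :
    l.attach.flatMap (fun x => f x.1) = l.flatMap f := by
  conv_rhs => rw [← List.attach_map_subtype_val l]
  rw [List.flatMap_map]

theorem flatMap_congr_mem {α β : Type} (l : List α) (f g : α → List β)
    (h : ∀ a ∈ l, f a = g a) : l.flatMap f = l.flatMap g := by
  induction l with
  | nil => rfl
  | cons a l ih =>
    simp only [List.flatMap_cons]
    rw [h a (by simp), ih (fun a' ha' => h a' (by simp [ha']))]

theorem goB_eq (pref : List Char) (group : List (List Char)) :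
    goB pref group =
      (if [] ∈ group then [pref] else []) ++
        (seenB group).flatMap (fun c => goB (pref ++ [c]) (tailsc c group)) := by
  rw [goB]
  congr 1
  exact flatMap_attach_val (seenB group) (fun c => goB (pref ++ [c]) (tailsc c group))

theorem collect_eq_goB (ss : List (List Char)) (pref : List Char) :
    collectT (buildFrom ss) pref = goB pref ss := by
  rw [buildFrom_canon, goB_eq, collectT, collectC_chList]
  congr 1
  · by_cases h : ([] : List Char) ∈ ss <;> simp [h]
  · apply flatMap_congr_mem
    intro c hc
    obtain ⟨r, hr⟩ := seenB_sound hc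
    have : mGrp (tailsc c ss) < mGrp ss := mGrp_tailsc_lt _ r _ hr
    exact collect_eq_goB (tailsc c ss) (pref ++ [c])
termination_by mGrp ss
decreasing_by
  exact this

theorem childFind_chList (cs : List Char) (ss : List (List Char)) (c : Char) :
    childFind (chList cs ss) c =
      if c ∈ cs then some (buildFrom (tailsc c ss)) else none := by
  induction cs with
  | nil => simp [chList, childFind]
  | cons c' cs ih =>
    by_cases h : c' = c
    · subst h; simp [chList, childFind]
    · simp [chList, childFind, h, ih, Ne.symm h]

theorem candTails_nil (ss : List (List Char)) : candTails [] ss = ss := by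
  simp [candTails, List.isPrefixOf]

theorem candTails_cons (c : Char) (p : List Char) (ss : List (List Char)) :
    candTails (c :: p) ss = candTails p (tailsc c ss) := by
  induction ss with
  | nil => rfl
  | cons s ss ih =>
    cases s with
    | nil =>
      have h1 : tailsc c ([] :: ss) = tailsc c ss := by simp [tailsc]
      have h2 : candTails (c :: p) ([] :: ss) = candTails (c :: p) ss := by
        simp [candTails, List.filterMap_cons, List.isPrefixOf]
      rw [h1, h2, ih]
    | cons c' r =>
      by_cases h : c' = c
      · subst h
        have h1 : tailsc c' ((c' :: r) :: ss) = r :: tailsc c' ss := by simp [tailsc]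
        rw [h1]
        by_cases hp : p <+: r
        · have hA : candTails (c' :: p) ((c' :: r) :: ss)
              = (r.drop p.length) :: candTails (c' :: p) ss := by
            simp [candTails, List.filterMap_cons, List.cons_prefix_cons, hp]
          have hB : candTails p (r :: tailsc c' ss)
              = (r.drop p.length) :: candTails p (tailsc c' ss) := by
            simp [candTails, List.filterMap_cons, hp]
          rw [hA, hB, ih]
        · have hA : candTails (c' :: p) ((c' :: r) :: ss) = candTails (c' :: p) ss := by
            simp [candTails, List.filterMap_cons, List.cons_prefix_cons, hp]
          have hB : candTails p (r :: tailsc c' ss) = candTails p (tailsc c' ss) := by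
            simp [candTails, List.filterMap_cons, hp]
          rw [hA, hB, ih]
      · have h1 : tailsc c ((c' :: r) :: ss) = tailsc c ss := by simp [tailsc, h]
        have h2 : candTails (c :: p) ((c' :: r) :: ss) = candTails (c :: p) ss := by
          simp [candTails, List.filterMap_cons, List.cons_prefix_cons, Ne.symm h]
        rw [h1, h2, ih]

theorem goB_nil (pref : List Char) : goB pref [] = [] := by
  rw [goB]; simp [seenB]

theorem descend_eq (p : List Char) : ∀ (ss : List (List Char)) (pref : List Char),
    (match descendT (buildFrom ss) p with
      | none => []
      | some n => collectT n (pref ++ p)) = goB (pref ++ p) (candTails p ss) := by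
  induction p with
  | nil =>
    intro ss pref
    simp only [descendT, candTails_nil, List.append_nil]
    exact collect_eq_goB ss pref
  | cons c p ih =>
    intro ss pref
    rw [buildFrom_canon]
    show (match (match childFind (chList (seenB ss) ss) c with
            | none => none
            | some t => descendT t p) with
          | none => ([] : List (List Char))
          | some n => collectT n (pref ++ c :: p)) = _
    rw [childFind_chList]
    by_cases h : c ∈ seenB ss
    · simp only [if_pos h]
      have heq : pref ++ c :: p = (pref ++ [c]) ++ p := by simp
      rw [heq, candTails_cons, ← ih (tailsc c ss) (pref ++ [c])]
    · simp only [if_neg h]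
      rw [candTails_cons, tailsc_nil_of_not_seen h]
      have : candTails p [] = [] := by simp [candTails]
      rw [this, goB_nil]

-- ===== VERDICT (by name: the statement is the Claim_ definition above) =====
theorem auto_complete_trie_spec : Claim_equal_auto_complete_trie := by
  intro words prefix_ _
  have hA : auto_complete_trie words prefix_
      = (match descendT (buildFrom (words.map String.toList)) prefix_.toList with
          | none => []
          | some n => collectT n prefix_.toList).map (fun l => String.mk l) := by
    simp only [auto_complete_trie]
    rw [show words.foldl (fun t w => insertT t w.toList) (.mk false .nil)
          = buildFrom (words.map String.toList) by simp [buildFrom, List.foldl_map]]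
    cases descendT (buildFrom (words.map String.toList)) prefix_.toList <;> simp
  have hB : auto_complete_trie_alt words prefix_
      = (goB prefix_.toList (candTails prefix_.toList (words.map String.toList))).map
          (fun l => String.mk l) := by
    simp only [auto_complete_trie_alt]
    rw [show words.filterMap (fun w =>
          if prefix_.toList.isPrefixOf w.toList then some (w.toList.drop prefix_.toList.length)
          else none) = candTails prefix_.toList (words.map String.toList) by
        simp [candTails, List.filterMap_map, Function.comp_def]]
  unfold Spec_auto_complete_trie
  rw [hA, hB]
  have hd := descend_eq prefix_.toList (words.map String.toList) []
  rw [List.nil_append] at hd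
  rw [hd]
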